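-- pv_equiv track=rewrite | github.com/jetstream5500/google_code_jam | 2010/qualification/B-Fair_Warning/google_solution/b.py | solve
-- ===== SOURCE A (Python) =====
-- import functools
--
-- def gcd(a, b):
--   if b == 0:
--     return a
--   return gcd(b, a % b)
--
-- def solve(L):
--   y = L[0]
--   L1 = [abs(x - y) for x in L]
--   g = functools.reduce(gcd, L1)
--   if y % g == 0:
--     return 0
--   else:
--     return g - (y % g)
-- ===== SOURCE B (Python) =====
-- def solve(L):
--     y = L[0]
--     g = 0
--     prev = y
--     for x in L[1:]:
--         d = abs(x - prev)
--         while d: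
--             g, d = d, g % d
--         prev = x
--     r = y % g
--     return 0 if r == 0 else g - r
-- ===== Notes on version B (the rewrite author's own statement) =====
-- stated objective: simpler
-- what changed: B replaces A's anchor-difference list comprehension plus functools.reduce over a recursive gcd with a single pass that folds an in-line iterative Euclid over consecutive differences |L[i]-L[i-1]|, building no intermediate list; the final wait computation is unchanged.
import Mathlib
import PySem

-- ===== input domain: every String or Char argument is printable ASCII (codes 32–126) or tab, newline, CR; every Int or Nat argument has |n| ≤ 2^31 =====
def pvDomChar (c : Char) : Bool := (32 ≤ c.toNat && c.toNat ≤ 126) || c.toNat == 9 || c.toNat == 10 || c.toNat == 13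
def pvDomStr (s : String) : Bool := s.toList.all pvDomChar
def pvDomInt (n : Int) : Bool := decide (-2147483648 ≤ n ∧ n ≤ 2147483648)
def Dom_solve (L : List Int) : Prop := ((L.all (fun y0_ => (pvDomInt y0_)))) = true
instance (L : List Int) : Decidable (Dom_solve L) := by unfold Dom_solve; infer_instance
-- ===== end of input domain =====

-- B replaces A's anchor-difference list + functools.reduce with a single pass over
-- consecutive differences folded through an in-line iterative Euclid (objective: simpler,
-- one pass, no intermediate list; same asymptotic cost).

-- termination fact both Euclid recursions cite: Python's % shrinks |divisor|
theorem pvModAbsLt (a b : Int) (h : ¬ b = 0) : (PySem.Int.mod a b).natAbs < b.natAbs := by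
  rcases lt_or_gt_of_ne h with hb | hb
  · have := PySem.Int.mod_neg_bounds a hb; omega
  · have h1 := PySem.Int.mod_nonneg a hb; have h2 := PySem.Int.mod_lt a hb; omega

-- ===== PORT A =====
-- recursive gcd, as in A
def pyGcd (a b : Int) : Int :=
  if b = 0 then a
  else pyGcd b (PySem.Int.mod a b)
termination_by b.natAbs
decreasing_by exact pvModAbsLt a b (by assumption)

def solve (L : List Int) : Int :=
  match L with
  | [] => 0        -- L[0] raises IndexError in Python; excluded by Pre_solve
  | y :: t =>
    let L1 := (y :: t).map (fun x => |x - y|)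
    -- functools.reduce(gcd, L1) on the nonempty L1
    let g := L1.tail.foldl pyGcd (L1.headD 0)
    let r := PySem.Int.mod y g
    if r = 0 then 0 else g - r

-- ===== PORT B =====
-- B's inner 'while d: g, d = d, g % d' loop
def bGcd (g d : Int) : Int :=
  if d = 0 then g
  else bGcd d (PySem.Int.mod g d)
termination_by d.natAbs
decreasing_by exact pvModAbsLt g d (by assumption)

def solve_alt (L : List Int) : Int :=
  match L with
  | [] => 0        -- L[0] raises IndexError in Python; excluded by Pre_solve
  | y :: _ =>
    -- for x in L[1:]: d = abs(x - prev); while d: g, d = d, g % d; prev = x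
    let p := (PySem.List.slice L (some 1) none).foldl
      (fun (p : Int × Int) x => (bGcd p.1 |x - p.2|, x)) (0, y)
    let r := PySem.Int.mod y p.1
    if r = 0 then 0 else p.1 - r

-- ===== PRECONDITION & SPEC =====
-- Pre_ excludes the empty list (A raises IndexError at L[0]) and lists whose elements are
-- all equal (gcd of the differences is 0, so A raises ZeroDivisionError at y % g; B raises there too).
def Pre_solve (L : List Int) : Prop := 1 ≤ L.length ∧ ∃ x ∈ L, x ≠ L.headD 0
instance (L : List Int) : Decidable (Pre_solve L) := by unfold Pre_solve; infer_instance
def pvWitness_solve : List Int := [3, 7]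

def Spec_solve (L : List Int) (out : Int) : Prop := out = solve_alt L
instance (L : List Int) (out : Int) : Decidable (Spec_solve L out) := by unfold Spec_solve; infer_instance

-- ===== CLAIM (what is proved, stated in full; the proofs are below) =====
def Claim_equal_solve : Prop := ∀ (L : List Int), Dom_solve L → Pre_solve L → Spec_solve L (solve L)

-- ===== LEMMAS AND PROOFS =====

-- both Euclid helpers are the same recursion
theorem bGcd_eq_pyGcd (a b : Int) : bGcd a b = pyGcd a b := by
  rw [bGcd, pyGcd]
  split
  · rfl
  · exact bGcd_eq_pyGcd b (PySem.Int.mod a b)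
termination_by b.natAbs
decreasing_by exact pvModAbsLt a b (by assumption)

-- on nonnegative inputs Python's recursive gcd is Int.gcd
theorem pyGcd_eq_gcd (a b : Int) (ha : 0 ≤ a) (hb : 0 ≤ b) :
    pyGcd a b = Int.gcd a b := by
  rw [pyGcd]
  split
  · next h => subst h; simp [Int.gcd, abs_of_nonneg ha]
  · next h =>
      have hbpos : 0 < b := lt_of_le_of_ne hb (Ne.symm h)
      have hm : 0 ≤ PySem.Int.mod a b := PySem.Int.mod_nonneg a hbpos
      rw [pyGcd_eq_gcd b (PySem.Int.mod a b) hb hm]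
      have hrep : PySem.Int.mod a b = a + b * (-(PySem.Int.floordiv a b)) := by
        have := PySem.Int.floordiv_mul_add_mod a b; ring_nf; linarith
      rw [hrep, Int.gcd_add_mul_left_right, Int.gcd_comm]
termination_by b.natAbs
decreasing_by exact pvModAbsLt a b (by assumption)

-- gcd with s is invariant under shifting the other argument by a multiple of s
theorem gcd_shift (s : Nat) (a b : Int) (h : (s:Int) ∣ (a - b)) :
    Nat.gcd s a.natAbs = Nat.gcd s b.natAbs := by
  obtain ⟨k, hk⟩ := h
  have ha : a = b + (s:Int) * k := by linarith
  have : Int.gcd (s:Int) a = Int.gcd (s:Int) b := by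
    rw [ha, Int.gcd_add_mul_left_right]
  simpa [Int.gcd] using this

-- the Nat-level anchor fold equals the Nat-level consecutive-difference fold
theorem fold_anchor_pairs (t : List Int) : ∀ (prev y : Int) (s : Nat),
    (s:Int) ∣ (prev - y) →
    t.foldl (fun g x => Nat.gcd g (x - y).natAbs) s
      = (t.foldl (fun (p : Nat × Int) x => (Nat.gcd p.1 (x - p.2).natAbs, x)) (s, prev)).1 := by
  induction t with
  | nil => intro prev y s _; rfl
  | cons x t ih =>
      intro prev y s hdvd
      simp only [List.foldl_cons]
      have hshift : Nat.gcd s (x - y).natAbs = Nat.gcd s (x - prev).natAbs :=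
        gcd_shift s (x - y) (x - prev) (by
          have : (x - y) - (x - prev) = prev - y := by ring
          rw [this]; exact hdvd)
      rw [hshift]
      exact ih x y (Nat.gcd s (x - prev).natAbs) (by
        rw [← hshift]
        exact Int.dvd_trans (Int.ofNat_dvd.mpr (Nat.gcd_dvd_right s (x - y).natAbs))
          (Int.natAbs_dvd.mpr dvd_rfl))

-- A's Int fold over the anchored absolute differences is the Nat fold, cast
theorem foldl_pyGcd_natAbs (t : List Int) (y : Int) : ∀ (s : Nat),
    (t.map (fun x => |x - y|)).foldl pyGcd (s:Int)
      = ((t.foldl (fun g x => Nat.gcd g (x - y).natAbs) s : Nat) : Int) := by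
  induction t with
  | nil => intro s; rfl
  | cons x t ih =>
      intro s
      simp only [List.map_cons, List.foldl_cons]
      have h1 : pyGcd (s:Int) |x - y| = ((Nat.gcd s (x - y).natAbs : Nat) : Int) := by
        rw [pyGcd_eq_gcd _ _ (by positivity) (abs_nonneg _)]
        simp [Int.gcd, Int.natAbs_abs]
      rw [h1, ih]

-- B's Int pair fold is the Nat pair fold, cast
theorem foldl_bGcd_pairs (t : List Int) : ∀ (prev : Int) (s : Nat),
    t.foldl (fun (p : Int × Int) x => (bGcd p.1 |x - p.2|, x)) ((s:Int), prev)
      = (((t.foldl (fun (p : Nat × Int) x => (Nat.gcd p.1 (x - p.2).natAbs, x)) (s, prev)).1 : Int),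
          (t.foldl (fun (p : Nat × Int) x => (Nat.gcd p.1 (x - p.2).natAbs, x)) (s, prev)).2) := by
  induction t with
  | nil => intro prev s; rfl
  | cons x t ih =>
      intro prev s
      simp only [List.foldl_cons]
      have h1 : bGcd (s:Int) |x - prev| = ((Nat.gcd s (x - prev).natAbs : Nat) : Int) := by
        rw [bGcd_eq_pyGcd, pyGcd_eq_gcd _ _ (by positivity) (abs_nonneg _)]
        simp [Int.gcd, Int.natAbs_abs]
      rw [h1, ih]

-- the two ports compute the same gcd, hence the same answer, on every nonempty list
theorem solve_eq_alt_cons (y : Int) (t : List Int) : solve (y :: t) = solve_alt (y :: t) := by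
  simp only [solve, solve_alt, List.map_cons, List.tail_cons, List.headD_cons,
    PySem.List.slice_from_one, List.tail_cons, sub_self, abs_zero]
  have hA := foldl_pyGcd_natAbs t y 0
  have hB := foldl_bGcd_pairs t y 0
  have hfold := fold_anchor_pairs t y y 0 (by simp)
  simp only [Nat.cast_zero] at hA hB
  rw [hA, hB, hfold]

-- ===== VERDICT (by name: the statement is the Claim_ definition above) =====
theorem solve_spec : Claim_equal_solve := by
  intro L _ hpre
  unfold Spec_solve
  match L with
  | [] => simp [Pre_solve] at hpre
  | y :: t => exact solve_eq_alt_cons y t
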